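-- pv_equiv track=rewrite | github.com/Pichayanon/detect-green-circle | extract_graph_from_image.py | count_consecutive_pairs
-- ===== SOURCE A (Python) =====
-- def count_consecutive_pairs(years):
--     if not years:
--         return 0
--     years = sorted([int(y) for y in years])
--     count = 0
--     for i in range(1, len(years)):
--         if years[i] == years[i - 1] + 1:
--             count += 1
--     return count
-- ===== SOURCE B (Python) =====
-- def count_consecutive_pairs(years):
--     s = {int(y) for y in years}
--     return sum(1 for v in s if v - 1 in s)
-- ===== Notes on version B (the rewrite author's own statement) =====
-- stated objective: alternative
-- what changed: Replaces sort + adjacent-index scan by a set of the values and a count of members whose predecessor is also in the set (each boundary between consecutive distinct values contributes exactly one adjacent pair after sorting).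
import Mathlib
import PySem

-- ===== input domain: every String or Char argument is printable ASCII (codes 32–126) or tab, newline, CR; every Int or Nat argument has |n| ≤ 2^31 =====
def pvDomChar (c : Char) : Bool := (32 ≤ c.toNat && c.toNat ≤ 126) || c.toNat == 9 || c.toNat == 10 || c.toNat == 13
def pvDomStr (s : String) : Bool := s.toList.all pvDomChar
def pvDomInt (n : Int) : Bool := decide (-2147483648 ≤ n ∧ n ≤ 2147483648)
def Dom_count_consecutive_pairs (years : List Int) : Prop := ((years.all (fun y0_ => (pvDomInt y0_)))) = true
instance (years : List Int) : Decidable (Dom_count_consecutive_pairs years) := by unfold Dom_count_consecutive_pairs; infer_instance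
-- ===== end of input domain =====

-- B replaces A's sort + adjacent-index scan by a set of the values and a count of
-- members whose predecessor is also in the set (objective: alternative algorithm).
-- ===== PORT A =====
def count_consecutive_pairs (years : List Int) : Int :=
  if years = [] then 0
  else
    let ys := PySem.List.sorted (years.map (fun y => y)) (fun x => x) false
    (PySem.List.pyRange 1 (ys.length : Int) 1).foldl
      (fun count i =>
        if PySem.List.pyGetD ys i 0 = PySem.List.pyGetD ys (i - 1) 0 + 1 then count + 1
        else count)
      0

-- ===== PORT B =====
def count_consecutive_pairs_alt (years : List Int) : Int :=
  let s : PySem.Set Int := PySem.Set.ofList (years.map (fun y => y))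
  ((s.countP (fun v => decide ((v - 1) ∈ s)) : Nat) : Int)

-- ===== PRECONDITION & SPEC =====
def Spec_count_consecutive_pairs (years : List Int) (out : Int) : Prop := out = count_consecutive_pairs_alt years
instance (years : List Int) (out : Int) : Decidable (Spec_count_consecutive_pairs years out) := by unfold Spec_count_consecutive_pairs; infer_instance

-- ===== CLAIM (what is proved, stated in full; the proofs are below) =====
def Claim_equal_count_consecutive_pairs : Prop := ∀ (years : List Int), Dom_count_consecutive_pairs years → Spec_count_consecutive_pairs years (count_consecutive_pairs years)

-- ===== LEMMAS AND PROOFS =====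

-- structural adjacent-pair counter (proof helper for A's index loop)
def adjC : List Int → Nat
  | [] => 0
  | [_] => 0
  | a :: b :: t => (if b = a + 1 then 1 else 0) + adjC (b :: t)

-- the set-level value both programs compute: distinct values whose predecessor is present
def succCard (ys : List Int) : Nat :=
  (ys.toFinset.filter (fun v => v - 1 ∈ ys.toFinset)).card

lemma succCard_congr (l l' : List Int) (hm : ∀ x : Int, x ∈ l ↔ x ∈ l') :
    succCard l = succCard l' := by
  have : l.toFinset = l'.toFinset := by ext x; simp [hm]
  unfold succCard; rw [this]

lemma countP_eq_succCard (d ys : List Int) (hnd : d.Nodup)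
    (hm : ∀ x : Int, x ∈ d ↔ x ∈ ys) :
    d.countP (fun v => decide ((v - 1) ∈ d)) = succCard ys := by
  have hfs : d.toFinset = ys.toFinset := by ext x; simp [hm]
  unfold succCard
  rw [← hfs, List.countP_eq_length_filter, ← List.toFinset_card_of_nodup (hnd.filter _)]
  congr 1
  ext x
  simp

lemma range_count_eq_adjC (l : List Int) :
    (List.range (l.length - 1)).countP
      (fun k => decide (l.getD (k + 1) 0 = l.getD k 0 + 1)) = adjC l := by
  induction l with
  | nil => simp [adjC]
  | cons a t ih =>
    cases t with
    | nil => simp [adjC]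
    | cons b t' =>
      rw [show (a :: b :: t').length - 1 = (b :: t').length - 1 + 1 by simp]
      rw [List.range_succ_eq_map, List.countP_cons, List.countP_map]
      rw [adjC]
      simp only [Function.comp_def, List.getD_cons_succ] at ih ⊢
      rw [ih]
      simp
      omega

lemma adjC_sorted_eq_succCard (ys : List Int) (h : ys.Pairwise (· ≤ ·)) :
    adjC ys = succCard ys := by
  induction ys with
  | nil => simp [adjC, succCard]
  | cons a t ih =>
    cases t with
    | nil =>
      have hne : ¬ (a - 1 = a) := by omega
      simp [adjC, succCard, Finset.filter_singleton, hne]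
    | cons b t' =>
      rw [List.pairwise_cons] at h
      obtain ⟨hle, hp⟩ := h
      have hab : a ≤ b := hle b (by simp)
      have hbt : ∀ x ∈ b :: t', b ≤ x := by
        intro x hx
        rcases List.mem_cons.mp hx with rfl | hx
        · exact le_refl _
        · exact (List.pairwise_cons.mp hp).1 x hx
      rw [adjC, ih hp]
      unfold succCard
      by_cases hEq : a = b
      · subst hEq
        have : (a :: a :: t').toFinset = (a :: t').toFinset := by simp
        rw [this]
        simp
      · have hlt : a < b := lt_of_le_of_ne hab hEq
        have haS : a ∉ (b :: t').toFinset := by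
          simp only [List.mem_toFinset]
          intro hm; exact absurd (hbt a hm) (by omega)
        set S := (b :: t').toFinset with hS
        have hins : (a :: b :: t').toFinset = insert a S := by simp [hS]
        rw [hins]
        have hlb : ∀ x ∈ S, b ≤ x := by
          intro x hx; exact hbt x (List.mem_toFinset.mp hx)
        have hafilt : ¬ (a - 1 ∈ insert a S) := by
          simp only [Finset.mem_insert]
          rintro (h1 | h2)
          · omega
          · exact absurd (hlb _ h2) (by omega)
        rw [Finset.filter_insert, if_neg hafilt]
        by_cases hb1 : b = a + 1
        · have key : S.filter (fun v => v - 1 ∈ insert a S)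
              = insert b (S.filter (fun v => v - 1 ∈ S)) := by
            ext x
            simp only [Finset.mem_filter, Finset.mem_insert]
            constructor
            · rintro ⟨hxS, h1 | h2⟩
              · left; omega
              · right; exact ⟨hxS, h2⟩
            · rintro (rfl | ⟨hxS, hx1⟩)
              · exact ⟨by simp [hS], Or.inl (by omega)⟩
              · exact ⟨hxS, Or.inr hx1⟩
          rw [key, if_pos hb1]
          have hbnot : b ∉ S.filter (fun v => v - 1 ∈ S) := by
            simp only [Finset.mem_filter]
            rintro ⟨-, hm⟩
            exact absurd (hlb _ hm) (by omega)
          rw [Finset.card_insert_of_notMem hbnot]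
          omega
        · have key : S.filter (fun v => v - 1 ∈ insert a S)
              = S.filter (fun v => v - 1 ∈ S) := by
            apply Finset.filter_congr
            intro x hx
            have hbx := hlb x hx
            simp only [Finset.mem_insert]
            constructor
            · rintro (h1 | h2)
              · exfalso; omega
              · exact h2
            · exact Or.inr
          rw [key, if_neg hb1]
          omega

-- ===== VERDICT (by name: the statement is the Claim_ definition above) =====
theorem count_consecutive_pairs_spec : Claim_equal_count_consecutive_pairs := by
  intro years _
  unfold Spec_count_consecutive_pairs count_consecutive_pairs count_consecutive_pairs_alt
  by_cases hnil : years = []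
  · subst hnil; simp
  rw [if_neg hnil]
  simp only [List.map_id']
  set ys := PySem.List.sorted years (fun x => x) false with hys
  rw [PySem.List.foldl_ite_add_one]
  rw [PySem.List.pyRange_one, List.countP_map]
  rw [zero_add]
  congr 1
  have hlen : (((ys.length : Int)) - 1).toNat = ys.length - 1 := by omega
  rw [hlen]
  have hpred : ∀ k ∈ List.range (ys.length - 1),
      ((fun x => decide (PySem.List.pyGetD ys x 0 = PySem.List.pyGetD ys (x - 1) 0 + 1)) ∘
        fun k : Nat => 1 + (k : Int)) k
      = (fun k : Nat => decide (ys.getD (k + 1) 0 = ys.getD k 0 + 1)) k := by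
    intro k _
    simp only [Function.comp_def]
    rw [show (1 + (k : Int)) = ((k + 1 : Nat) : Int) by omega,
      show ((k + 1 : Nat) : Int) - 1 = ((k : Nat) : Int) by omega,
      PySem.List.pyGetD_natCast, PySem.List.pyGetD_natCast]
  rw [List.countP_congr (fun x hx => by rw [hpred x hx])]
  rw [range_count_eq_adjC ys]
  rw [adjC_sorted_eq_succCard ys (PySem.List.sorted_pairwise years (fun x => x))]
  rw [countP_eq_succCard (PySem.Set.ofList years) years (PySem.Set.nodup_ofList years)
    (fun x => PySem.Set.mem_ofList years x)]
  exact succCard_congr ys years (fun x => PySem.List.mem_sorted years (fun x => x) false x)
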